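-- pv_equiv track=rewrite | github.com/lathac6/python-problem-solving | number_system programs/xylem and phloem between m and n.py | is_xylem
-- ===== SOURCE A (Python) =====
-- def is_xylem(n:int)->bool:
--     es=0
--     ms=0
--     temp=n
--     while n>0:
--         d=n%10
--         if temp==n or d==n:
--             es+=d
--         else:
--             ms+=d
--         n//=10
--     return es==ms
-- ===== SOURCE B (Python) =====
-- def is_xylem(n: int) -> bool:
--     if n <= 0:
--         return True
--     total = 0
--     m = n
--     while m > 0:
--         total += m % 10
--         m //= 10
--     first = n
--     while first >= 10:
--         first //= 10
--     last = n % 10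
--     es = last if n < 10 else first + last
--     return 2 * es == total
-- ===== Notes on version B (the rewrite author's own statement) =====
-- stated objective: alternative
-- what changed: Replaces A's single conditional while-loop that routes each digit into es or ms by comparisons against saved state with two plain loops computing the total digit sum and the leading digit, then checks that twice the sum of first and last digits equals the total digit sum (equivalent to es == ms since ms = total - es).
import Mathlib
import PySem

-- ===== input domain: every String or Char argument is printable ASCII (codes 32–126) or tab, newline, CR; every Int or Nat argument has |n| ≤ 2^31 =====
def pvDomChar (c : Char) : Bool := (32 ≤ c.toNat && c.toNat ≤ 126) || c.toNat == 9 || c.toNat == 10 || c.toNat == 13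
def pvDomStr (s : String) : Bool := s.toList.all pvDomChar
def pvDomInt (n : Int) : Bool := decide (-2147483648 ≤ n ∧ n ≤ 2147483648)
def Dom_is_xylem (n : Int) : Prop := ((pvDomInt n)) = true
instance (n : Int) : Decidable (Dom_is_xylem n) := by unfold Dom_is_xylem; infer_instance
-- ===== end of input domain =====

-- B replaces A's conditional digit-routing loop by two plain loops (digit sum, leading digit)
-- and the arithmetic test 2*(first+last) == total; alternative decomposition, same cost.


-- ===== PORT A =====
-- while n>0: d=n%10; if temp==n or d==n: es+=d else: ms+=d; n//=10; return es==ms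
-- (fuel-guarded structural recursion; n.toNat+1 steps always suffice since n shrinks by //10)
def pvLoopA : Nat → Int → Int → Int → Int → Bool
  | 0, _, _, es, ms => decide (es = ms)
  | fuel + 1, temp, n, es, ms =>
    if n > 0 then
      let d := PySem.Int.mod n 10
      if temp = n ∨ d = n then
        pvLoopA fuel temp (PySem.Int.floordiv n 10) (es + d) ms
      else
        pvLoopA fuel temp (PySem.Int.floordiv n 10) es (ms + d)
    else
      decide (es = ms)

def is_xylem (n : Int) : Bool := pvLoopA (n.toNat + 1) n n 0 0

-- ===== PORT B =====
-- while m>0: total += m%10; m //= 10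
def pvTotalB : Nat → Int → Int → Int
  | 0, _, acc => acc
  | fuel + 1, m, acc =>
    if m > 0 then
      pvTotalB fuel (PySem.Int.floordiv m 10) (acc + PySem.Int.mod m 10)
    else acc

-- while first>=10: first //= 10
def pvFirstB : Nat → Int → Int
  | 0, m => m
  | fuel + 1, m =>
    if m ≥ 10 then pvFirstB fuel (PySem.Int.floordiv m 10) else m

def is_xylem_alt (n : Int) : Bool :=
  if n ≤ 0 then true
  else
    let total := pvTotalB (n.toNat + 1) n 0
    let first := pvFirstB (n.toNat + 1) n
    let last := PySem.Int.mod n 10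
    let es := if n < 10 then last else first + last
    decide (2 * es = total)

-- ===== PRECONDITION & SPEC =====
def Spec_is_xylem (n : Int) (out : Bool) : Prop := out = is_xylem_alt n
instance (n : Int) (out : Bool) : Decidable (Spec_is_xylem n out) := by unfold Spec_is_xylem; infer_instance

-- ===== CLAIM (what is proved, stated in full; the proofs are below) =====
def Claim_equal_is_xylem : Prop := ∀ (n : Int), Dom_is_xylem n → Spec_is_xylem n (is_xylem n)

-- ===== LEMMAS AND PROOFS =====

theorem pvFd (n : Int) (h : 0 < n) : PySem.Int.floordiv n 10 = n / 10 :=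
  PySem.Int.floordiv_eq_ediv_of_pos (by omega)

theorem pvMd (n : Int) (h : 0 < n) : PySem.Int.mod n 10 = n % 10 :=
  PySem.Int.mod_eq_emod_of_pos (by omega)

theorem pvLoopA_zero (fuel : Nat) (temp n es ms : Int) (h : ¬ n > 0) :
    pvLoopA fuel temp n es ms = decide (es = ms) := by
  cases fuel with
  | zero => rfl
  | succ k => rw [pvLoopA, if_neg h]

theorem pvTotalB_irrel (f : Nat) : ∀ (g : Nat) (m acc : Int), m.toNat ≤ f → m.toNat ≤ g →
    pvTotalB f m acc = pvTotalB g m acc := by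
  induction f with
  | zero =>
    intro g m acc hf _
    have hm : ¬ m > 0 := by omega
    cases g with
    | zero => rfl
    | succ k => rw [pvTotalB, pvTotalB, if_neg hm]
  | succ f ih =>
    intro g m acc hf hg
    by_cases hm : m > 0
    · cases g with
      | zero => omega
      | succ k =>
        rw [pvTotalB, pvTotalB, if_pos hm, if_pos hm, pvFd m hm]
        exact ih k (m / 10) _ (by omega) (by omega)
    · cases g with
      | zero => rw [pvTotalB, pvTotalB, if_neg hm]
      | succ k => rw [pvTotalB, pvTotalB, if_neg hm, if_neg hm]

theorem pvFirstB_irrel (f : Nat) : ∀ (g : Nat) (m : Int), m.toNat ≤ f → m.toNat ≤ g →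
    pvFirstB f m = pvFirstB g m := by
  induction f with
  | zero =>
    intro g m hf _
    have hm : ¬ m ≥ 10 := by omega
    cases g with
    | zero => rfl
    | succ k => rw [pvFirstB, pvFirstB, if_neg hm]
  | succ f ih =>
    intro g m hf hg
    by_cases hm : m ≥ 10
    · cases g with
      | zero => omega
      | succ k =>
        rw [pvFirstB, pvFirstB, if_pos hm, if_pos hm, pvFd m (by omega)]
        exact ih k (m / 10) (by omega) (by omega)
    · cases g with
      | zero => rw [pvFirstB, pvFirstB, if_neg hm]
      | succ k => rw [pvFirstB, pvFirstB, if_neg hm, if_neg hm]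

theorem pvTotalB_acc (f : Nat) : ∀ (m acc : Int), pvTotalB f m acc = pvTotalB f m 0 + acc := by
  induction f with
  | zero => intro m acc; rw [pvTotalB, pvTotalB]; ring
  | succ f ih =>
    intro m acc
    by_cases hm : m > 0
    · rw [pvTotalB, pvTotalB, if_pos hm, if_pos hm]
      have e1 := ih (PySem.Int.floordiv m 10) (acc + PySem.Int.mod m 10)
      have e2 := ih (PySem.Int.floordiv m 10) (0 + PySem.Int.mod m 10)
      omega
    · rw [pvTotalB, pvTotalB, if_neg hm, if_neg hm]; ring

-- spec-side abbreviations: T n = digit sum of n, F n = leading digit of n (for n > 0)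
def pvT (n : Int) : Int := pvTotalB n.toNat n 0
def pvF (n : Int) : Int := pvFirstB n.toNat n

theorem pvT_step (n : Int) (h : 0 < n) : pvT n = n % 10 + pvT (n / 10) := by
  obtain ⟨k, hk⟩ : ∃ k, n.toNat = k + 1 := ⟨n.toNat - 1, by omega⟩
  unfold pvT
  rw [hk, pvTotalB, if_pos h, pvFd n h, pvMd n h, pvTotalB_acc,
      pvTotalB_irrel k (n / 10).toNat (n / 10) 0 (by omega) (le_refl _)]
  ring

theorem pvT_small (n : Int) (h0 : 0 < n) (h : n < 10) : pvT n = n := by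
  rw [pvT_step n h0]
  have h1 : n % 10 = n := by omega
  have h2 : n / 10 = 0 := by omega
  rw [h1, h2]
  unfold pvT
  norm_num [pvTotalB]

theorem pvF_step (n : Int) (h : 10 ≤ n) : pvF n = pvF (n / 10) := by
  obtain ⟨k, hk⟩ : ∃ k, n.toNat = k + 1 := ⟨n.toNat - 1, by omega⟩
  unfold pvF
  rw [hk, pvFirstB, if_pos h, pvFd n (by omega),
      pvFirstB_irrel k (n / 10).toNat (n / 10) (by omega) (le_refl _)]

theorem pvF_small (n : Int) (h0 : 0 < n) (h : ¬ n ≥ 10) : pvF n = n := by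
  obtain ⟨k, hk⟩ : ∃ k, n.toNat = k + 1 := ⟨n.toNat - 1, by omega⟩
  unfold pvF
  rw [hk, pvFirstB, if_neg h]

-- A's loop after the first iteration (n < temp): es gains the leading digit,
-- ms gains all remaining digits, i.e. total minus leading.
theorem pvLoopA_char (fuel : Nat) : ∀ (temp n es ms : Int), n.toNat ≤ fuel → 0 < n → n < temp →
    pvLoopA fuel temp n es ms = decide (es + pvF n = ms + (pvT n - pvF n)) := by
  induction fuel with
  | zero => intro temp n es ms hf hn _; omega
  | succ fuel ih =>
    intro temp n es ms hf hn hlt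
    by_cases h : n ≥ 10
    · have hne : ¬ (temp = n ∨ PySem.Int.mod n 10 = n) := by
        rw [pvMd n hn]
        refine not_or.mpr ⟨by omega, by omega⟩
      rw [pvLoopA, if_pos hn, if_neg hne, pvFd n hn, pvMd n hn,
          ih temp (n / 10) es (ms + n % 10) (by omega) (by omega) (by omega),
          pvF_step n h, pvT_step n hn]
      exact decide_eq_decide.mpr (by constructor <;> intro h' <;> omega)
    · have hdn : PySem.Int.mod n 10 = n := by rw [pvMd n hn]; omega
      rw [pvLoopA, if_pos hn, if_pos (Or.inr hdn), hdn, pvFd n hn,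
          pvLoopA_zero fuel temp (n / 10) (es + n) ms (by omega),
          pvF_small n hn h, pvT_small n hn (by omega)]
      exact decide_eq_decide.mpr (by constructor <;> intro h' <;> omega)

-- ===== VERDICT (by name: the statement is the Claim_ definition above) =====
theorem is_xylem_spec : Claim_equal_is_xylem := by
  intro n _
  unfold Spec_is_xylem is_xylem is_xylem_alt
  by_cases hle : n ≤ 0
  · rw [pvLoopA_zero (n.toNat + 1) n n 0 0 (by omega), if_pos hle]
    simp
  · rw [if_neg hle]
    have hn : 0 < n := by omega
    have hT : pvTotalB (n.toNat + 1) n 0 = pvT n := by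
      unfold pvT; exact pvTotalB_irrel (n.toNat + 1) n.toNat n 0 (by omega) (le_refl _)
    have hF : pvFirstB (n.toNat + 1) n = pvF n := by
      unfold pvF; exact pvFirstB_irrel (n.toNat + 1) n.toNat n (by omega) (le_refl _)
    rw [hT, hF, pvLoopA, if_pos hn, if_pos (Or.inl rfl), pvFd n hn, pvMd n hn]
    by_cases h10 : n < 10
    · -- single digit: A adds it once to es (temp==n branch), then the loop ends
      rw [pvLoopA_zero n.toNat n (n / 10) (0 + n % 10) 0 (by omega)]
      simp only [if_pos h10]
      rw [pvT_small n hn h10]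
      exact decide_eq_decide.mpr (by constructor <;> intro h' <;> omega)
    · -- n >= 10: first iteration puts the last digit into es, then pvLoopA_char applies
      rw [pvLoopA_char n.toNat n (n / 10) (0 + n % 10) 0 (by omega) (by omega) (by omega)]
      simp only [if_neg h10]
      rw [← pvF_step n (by omega), pvT_step n hn]
      exact decide_eq_decide.mpr (by constructor <;> intro h' <;> omega)
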